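-- pv_equiv track=rewrite | github.com/tastelikefeet/twinkle | src/twinkle/template/utils.py | _transfer_single_message
-- ===== SOURCE A (Python) =====
-- def _transfer_single_message(content: str, image_placeholder, video_placeholder, images, videos):
--     image_idx = 0
--     video_idx = 0
--     remaining = content
--     # Handle None images/videos
--     images = images or []
--     videos = videos or []
--     has_image = image_placeholder in content
--     has_video = video_placeholder in content
--     new_content = []
--     while remaining:
--         img_pos = remaining.find(image_placeholder) if has_image else -1
--         vid_pos = remaining.find(video_placeholder) if has_video else -1
--
--         # Find next placeholder
--         if img_pos == -1 and vid_pos == -1: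
--             if remaining.strip():
--                 new_content.append({'type': 'text', 'text': remaining})
--             break
--
--         # Determine which comes first
--         if vid_pos == -1 or (img_pos != -1 and img_pos < vid_pos):
--             # Image placeholder
--             if remaining[:img_pos].strip():
--                 new_content.append({'type': 'text', 'text': remaining[:img_pos]})
--             if image_idx < len(images):
--                 new_content.append({'type': 'image', 'url': images[image_idx]})
--                 image_idx += 1
--             remaining = remaining[img_pos + len(image_placeholder):]
--         else:
--             # Video placeholder
--             if remaining[:vid_pos].strip():
--                 new_content.append({'type': 'text', 'text': remaining[:vid_pos]})
--             if video_idx < len(videos):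
--                 new_content.append({'type': 'video', 'url': videos[video_idx]})
--                 video_idx += 1
--             remaining = remaining[vid_pos + len(video_placeholder):]
--     return new_content
-- ===== SOURCE B (Python) =====
-- def _transfer_single_message(content: str, image_placeholder, video_placeholder, images, videos):
--     # Single left-to-right scan: at each index try the placeholders (video wins a tie,
--     # as the earliest-position rule with tie-to-video), otherwise buffer the character.
--     images = images or []
--     videos = videos or []
--     out = []
--     buf = []
--     img_idx = 0
--     vid_idx = 0
--     i = 0
--     n = len(content)
--     while i < n:
--         if video_placeholder and content.startswith(video_placeholder, i):
--             if ''.join(buf).strip():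
--                 out.append({'type': 'text', 'text': ''.join(buf)})
--             buf = []
--             if vid_idx < len(videos):
--                 out.append({'type': 'video', 'url': videos[vid_idx]})
--                 vid_idx += 1
--             i += len(video_placeholder)
--         elif image_placeholder and content.startswith(image_placeholder, i):
--             if ''.join(buf).strip():
--                 out.append({'type': 'text', 'text': ''.join(buf)})
--             buf = []
--             if img_idx < len(images):
--                 out.append({'type': 'image', 'url': images[img_idx]})
--                 img_idx += 1
--             i += len(image_placeholder)
--         else:
--             buf.append(content[i])
--             i += 1
--     if buf and ''.join(buf).strip():
--         out.append({'type': 'text', 'text': ''.join(buf)})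
--     return out
-- ===== Notes on version B (the rewrite author's own statement) =====
-- stated objective: alternative
-- what changed: Replaces the repeated find-and-reslice loop (each step re-searches and copies the remaining string) by one single left-to-right scan over the content that tries the placeholders at each index (video wins ties, matching A's earliest-position rule) and buffers text characters, emitting segments in one pass without ever reslicing.
-- outside the precondition, e.g. on _transfer_single_message('', '', 'v', None, None): A returns [], B returns []
import Mathlib
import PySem

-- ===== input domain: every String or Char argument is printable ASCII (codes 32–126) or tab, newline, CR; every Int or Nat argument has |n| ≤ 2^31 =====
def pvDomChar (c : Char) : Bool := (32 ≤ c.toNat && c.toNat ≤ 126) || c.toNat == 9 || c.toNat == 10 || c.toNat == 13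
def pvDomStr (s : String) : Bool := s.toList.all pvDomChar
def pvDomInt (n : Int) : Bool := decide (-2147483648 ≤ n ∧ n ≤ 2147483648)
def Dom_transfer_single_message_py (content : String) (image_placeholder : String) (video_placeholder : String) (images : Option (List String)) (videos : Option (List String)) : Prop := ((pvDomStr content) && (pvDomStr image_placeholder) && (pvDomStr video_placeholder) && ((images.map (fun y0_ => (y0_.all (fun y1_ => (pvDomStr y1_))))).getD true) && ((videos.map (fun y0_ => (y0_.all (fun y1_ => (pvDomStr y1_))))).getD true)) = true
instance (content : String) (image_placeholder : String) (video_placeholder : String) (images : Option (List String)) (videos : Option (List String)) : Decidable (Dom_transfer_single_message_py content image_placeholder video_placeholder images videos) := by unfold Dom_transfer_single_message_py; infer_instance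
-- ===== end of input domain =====

-- B replaces A's repeated find-and-reslice loop by a single left-to-right scan that tries the
-- placeholders at each index and buffers text characters; return values proved equal on Pre_.

-- ===== PORT A =====
-- a dict {'type': t, 'text'/'url': v} as an association list
def pvSeg (t : String) (k : String) (v : String) : List (String × String) :=
  [("type", t), (k, v)]

-- the while-loop of A, fuel-totalised (fuel is only a totaliser; under Pre_ it never runs out)
def pvALoop (ip vp : List Char) (hasImg hasVid : Bool) (images videos : List String) :
    Nat → List Char → Nat → Nat → List (List (String × String)) → List (List (String × String))
  | 0, _, _, _, acc => acc
  | fuel + 1, remaining, imageIdx, videoIdx, acc =>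
    if remaining = [] then acc
    else
      let imgPos : Int := if hasImg then PySem.Chars.find remaining ip else -1
      let vidPos : Int := if hasVid then PySem.Chars.find remaining vp else -1
      if imgPos = -1 ∧ vidPos = -1 then
        if PySem.Chars.strip remaining ≠ [] then acc ++ [pvSeg "text" "text" (String.ofList remaining)] else acc
      else if vidPos = -1 ∨ (imgPos ≠ -1 ∧ imgPos < vidPos) then
        let pre := PySem.List.slice remaining none (some imgPos)
        let acc1 := if PySem.Chars.strip pre ≠ [] then acc ++ [pvSeg "text" "text" (String.ofList pre)] else acc
        let acc2 := if imageIdx < images.length then acc1 ++ [pvSeg "image" "url" (images.getD imageIdx "")] else acc1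
        let imageIdx' := if imageIdx < images.length then imageIdx + 1 else imageIdx
        pvALoop ip vp hasImg hasVid images videos fuel
          (PySem.List.slice remaining (some (imgPos + ip.length)) none) imageIdx' videoIdx acc2
      else
        let pre := PySem.List.slice remaining none (some vidPos)
        let acc1 := if PySem.Chars.strip pre ≠ [] then acc ++ [pvSeg "text" "text" (String.ofList pre)] else acc
        let acc2 := if videoIdx < videos.length then acc1 ++ [pvSeg "video" "url" (videos.getD videoIdx "")] else acc1
        let videoIdx' := if videoIdx < videos.length then videoIdx + 1 else videoIdx
        pvALoop ip vp hasImg hasVid images videos fuel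
          (PySem.List.slice remaining (some (vidPos + vp.length)) none) imageIdx videoIdx'
          acc2

def transfer_single_message_py (content : String) (image_placeholder : String) (video_placeholder : String) (images : Option (List String)) (videos : Option (List String)) : List (List (String × String)) :=
  let imgs := images.getD []          -- images or []
  let vids := videos.getD []          -- videos or []
  let hasImg := PySem.Str.isIn image_placeholder content
  let hasVid := PySem.Str.isIn video_placeholder content
  pvALoop image_placeholder.toList video_placeholder.toList hasImg hasVid imgs vids
    (content.toList.length + 1) content.toList 0 0 []

-- ===== PORT B =====
-- the single scan of B, fuel-totalised the same way
def pvBLoop (ip vp : List Char) (images videos : List String) :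
    Nat → List Char → List Char → Nat → Nat → List (List (String × String)) → List (List (String × String))
  | 0, _, _, _, _, out => out
  | fuel + 1, cs, buf, imgIdx, vidIdx, out =>
    match cs with
    | [] => if buf ≠ [] ∧ PySem.Chars.strip buf ≠ [] then out ++ [pvSeg "text" "text" (String.ofList buf)] else out
    | c :: rest =>
      if vp ≠ [] ∧ vp.isPrefixOf cs then
        let out1 := if PySem.Chars.strip buf ≠ [] then out ++ [pvSeg "text" "text" (String.ofList buf)] else out
        let out2 := if vidIdx < videos.length then out1 ++ [pvSeg "video" "url" (videos.getD vidIdx "")] else out1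
        let vidIdx' := if vidIdx < videos.length then vidIdx + 1 else vidIdx
        pvBLoop ip vp images videos fuel (cs.drop vp.length) [] imgIdx vidIdx' out2
      else if ip ≠ [] ∧ ip.isPrefixOf cs then
        let out1 := if PySem.Chars.strip buf ≠ [] then out ++ [pvSeg "text" "text" (String.ofList buf)] else out
        let out2 := if imgIdx < images.length then out1 ++ [pvSeg "image" "url" (images.getD imgIdx "")] else out1
        let imgIdx' := if imgIdx < images.length then imgIdx + 1 else imgIdx
        pvBLoop ip vp images videos fuel (cs.drop ip.length) [] imgIdx' vidIdx out2
      else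
        pvBLoop ip vp images videos fuel rest (buf ++ [c]) imgIdx vidIdx out

def transfer_single_message_py_alt (content : String) (image_placeholder : String) (video_placeholder : String) (images : Option (List String)) (videos : Option (List String)) : List (List (String × String)) :=
  let imgs := images.getD []
  let vids := videos.getD []
  pvBLoop image_placeholder.toList video_placeholder.toList imgs vids
    (content.toList.length + 1) content.toList [] 0 0 []

-- ===== PRECONDITION & SPEC =====
-- Pre_ excludes empty placeholder strings: there A's find('') = 0 makes the loop consume
-- nothing and A loops forever on almost every content (a defensible corner nobody specifies).
def Pre_transfer_single_message_py (content : String) (image_placeholder : String) (video_placeholder : String) (images : Option (List String)) (videos : Option (List String)) : Prop :=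
  image_placeholder ≠ "" ∧ video_placeholder ≠ ""
instance (content : String) (image_placeholder : String) (video_placeholder : String) (images : Option (List String)) (videos : Option (List String)) : Decidable (Pre_transfer_single_message_py content image_placeholder video_placeholder images videos) := by unfold Pre_transfer_single_message_py; infer_instance

def pvWitness_transfer_single_message_py : String × String × String × Option (List String) × Option (List String) :=
  ("a <i> b <v>", "<i>", "<v>", some ["u1"], some ["w1"])

def Spec_transfer_single_message_py (content : String) (image_placeholder : String) (video_placeholder : String) (images : Option (List String)) (videos : Option (List String)) (out : List (List (String × String))) : Prop := out = transfer_single_message_py_alt content image_placeholder video_placeholder images videos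
instance (content : String) (image_placeholder : String) (video_placeholder : String) (images : Option (List String)) (videos : Option (List String)) (out : List (List (String × String))) : Decidable (Spec_transfer_single_message_py content image_placeholder video_placeholder images videos out) := by unfold Spec_transfer_single_message_py; infer_instance

-- ===== CLAIM (what is proved, stated in full; the proofs are below) =====
def Claim_equal_transfer_single_message_py : Prop := ∀ (content : String) (image_placeholder : String) (video_placeholder : String) (images : Option (List String)) (videos : Option (List String)), Dom_transfer_single_message_py content image_placeholder video_placeholder images videos → Pre_transfer_single_message_py content image_placeholder video_placeholder images videos → Spec_transfer_single_message_py content image_placeholder video_placeholder images videos (transfer_single_message_py content image_placeholder video_placeholder images videos)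


-- ===== LEMMAS AND PROOFS =====

-- find returns the first position at which sub occurs
lemma pvFind_eq_of_first (s sub : List Char) (k : Nat) (hk : sub <+: s.drop k)
    (hmin : ∀ i, i < k → ¬ sub <+: s.drop i) : PySem.Chars.find s sub = (k : Int) := by
  have hin : PySem.Chars.isIn sub s = true :=
    (PySem.Chars.exists_prefix_drop_iff_isIn sub s).mp ⟨k, hk⟩
  have hnn : 0 ≤ PySem.Chars.find s sub :=
    (PySem.Chars.find_nonneg_iff s sub).mpr ((PySem.Chars.isIn_iff_infix sub s).mp hin)
  obtain ⟨hp, hm⟩ := PySem.Chars.find_spec (s := s) (sub := sub) hnn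
  rcases lt_trichotomy (PySem.Chars.find s sub).toNat k with h | h | h
  · exact absurd hp (hmin _ h)
  · omega
  · exact absurd hk (hm k h)

-- no occurrence anywhere → find = -1
lemma pvFind_eq_neg_one_of_none (s sub : List Char) (h : ∀ i, ¬ sub <+: s.drop i) :
    PySem.Chars.find s sub = -1 := by
  rw [PySem.Chars.find_eq_neg_one_iff s sub]
  intro hinf
  obtain ⟨j, hj⟩ := (PySem.Chars.exists_prefix_drop_iff_isIn sub s).mpr
    ((PySem.Chars.isIn_iff_infix sub s).mpr hinf)
  exact h j hj

-- an occurrence inside a suffix of content is an occurrence in content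
lemma pvInfix_of_suffix_drop (content rem sub : List Char) (j : Nat)
    (hsuf : rem <:+ content) (hj : sub <+: rem.drop j) : sub <:+: content := by
  have h1 : sub <:+: rem := hj.isInfix.trans (List.drop_suffix j rem).isInfix
  exact h1.trans hsuf.isInfix

-- the has_image/has_video guard collapses on suffixes of content
lemma pvPos_collapse (content rem sub : List Char) (hsuf : rem <:+ content) :
    (if PySem.Chars.isIn sub content then PySem.Chars.find rem sub else -1)
      = PySem.Chars.find rem sub := by
  by_cases h : PySem.Chars.isIn sub content = true
  · simp [h]
  · have hni : ¬ sub <:+: content := (PySem.Chars.isIn_eq_false_iff sub content).mp (by simpa using h)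
    have : PySem.Chars.find rem sub = -1 := by
      apply pvFind_eq_neg_one_of_none
      intro i hi
      exact hni (pvInfix_of_suffix_drop content rem sub i hsuf hi)
    simp [h, this]

-- main loop correspondence: A's find-and-reslice loop = B's single scan
lemma pvMain (ip vp : List Char) (hip : ip ≠ []) (hvp : vp ≠ []) (content : List Char)
    (images videos : List String) :
    ∀ fb : Nat, ∀ (cs buf : List Char) (ii vi : Nat) (acc : List (List (String × String))) (fa : Nat),
      cs.length < fb → (buf ++ cs).length < fa →
      (buf ++ cs) <:+ content →
      (∀ j, j < buf.length → ¬ vp <+: (buf ++ cs).drop j ∧ ¬ ip <+: (buf ++ cs).drop j) →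
      pvALoop ip vp (PySem.Chars.isIn ip content) (PySem.Chars.isIn vp content)
          images videos fa (buf ++ cs) ii vi acc
        = pvBLoop ip vp images videos fb cs buf ii vi acc := by
  intro fb
  induction fb with
  | zero => intro cs buf ii vi acc fa hfb; omega
  | succ fb ih =>
    intro cs buf ii vi acc fa hfb hfa hsuf hnb
    cases fa with
    | zero => simp at hfa
    | succ fa =>
      cases cs with
      | nil =>
        simp only [List.append_nil] at hfa hsuf hnb ⊢
        have hnoip : PySem.Chars.find buf ip = -1 := by
          apply pvFind_eq_neg_one_of_none
          intro i hpre
          by_cases hi : i < buf.length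
          · exact (hnb i hi).2 (by simpa using hpre)
          · rw [List.drop_eq_nil_of_le (by omega)] at hpre
            exact hip (List.prefix_nil.mp hpre)
        have hnovp : PySem.Chars.find buf vp = -1 := by
          apply pvFind_eq_neg_one_of_none
          intro i hpre
          by_cases hi : i < buf.length
          · exact (hnb i hi).1 (by simpa using hpre)
          · rw [List.drop_eq_nil_of_le (by omega)] at hpre
            exact hvp (List.prefix_nil.mp hpre)
        have h1 := pvPos_collapse content buf ip hsuf
        have h2 := pvPos_collapse content buf vp hsuf
        by_cases hb : buf = []
        · subst hb; simp [pvALoop, pvBLoop]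
        · simp only [pvALoop, pvBLoop]
          rw [if_neg hb, h1, h2, hnoip, hnovp]
          simp [hb]
      | cons c rest =>
        have hremne : buf ++ c :: rest ≠ [] := by simp
        have hdropbuf : (buf ++ c :: rest).drop buf.length = c :: rest := List.drop_left
        have h1 := pvPos_collapse content (buf ++ c :: rest) ip hsuf
        have h2 := pvPos_collapse content (buf ++ c :: rest) vp hsuf
        by_cases hv : vp.isPrefixOf (c :: rest)
        · -- video placeholder matches here: A takes the video branch with vid_pos = buf.length
          have hvpre : vp <+: (c :: rest) := List.isPrefixOf_iff_prefix.mp hv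
          have hfindvp : PySem.Chars.find (buf ++ c :: rest) vp = (buf.length : Int) :=
            pvFind_eq_of_first _ _ _ (by rw [hdropbuf]; exact hvpre) (fun i hi => (hnb i hi).1)
          have hasVid : PySem.Chars.isIn vp content = true :=
            (PySem.Chars.isIn_iff_infix vp content).mpr
              (pvInfix_of_suffix_drop content _ vp buf.length hsuf (by rw [hdropbuf]; exact hvpre))
          have himgge : PySem.Chars.find (buf ++ c :: rest) ip = -1 ∨
              (buf.length : Int) ≤ PySem.Chars.find (buf ++ c :: rest) ip := by
            by_cases h0 : 0 ≤ PySem.Chars.find (buf ++ c :: rest) ip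
            · right
              obtain ⟨hp, _⟩ := PySem.Chars.find_spec h0
              by_contra hlt
              push Not at hlt
              exact (hnb (PySem.Chars.find (buf ++ c :: rest) ip).toNat (by omega)).2 hp
            · left
              have := PySem.Chars.neg_one_le_find (buf ++ c :: rest) ip
              omega
          -- the slices A takes
          have hpre_eq : PySem.List.slice (buf ++ c :: rest) none (some ((buf.length : Nat) : Int)) = buf := by
            rw [PySem.List.slice_to_natCast]; exact List.take_left
          have hrem_eq : PySem.List.slice (buf ++ c :: rest) (some (((buf.length : Nat) : Int) + (vp.length : Int))) none
              = (c :: rest).drop vp.length := by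
            rw [PySem.List.slice_from _ (by positivity)]
            have : (((buf.length : Nat) : Int) + (vp.length : Int)).toNat = buf.length + vp.length := by omega
            rw [this]
            simp [List.drop_append]
          have hvl : 0 < vp.length := List.length_pos_iff.mpr hvp
          have hcond1 : ¬ (PySem.Chars.find (buf ++ c :: rest) ip = -1 ∧ ((buf.length : Nat) : Int) = -1) := by
            omega
          have hcond2 : ¬ (((buf.length : Nat) : Int) = -1 ∨
              (PySem.Chars.find (buf ++ c :: rest) ip ≠ -1 ∧
               PySem.Chars.find (buf ++ c :: rest) ip < ((buf.length : Nat) : Int))) := by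
            rintro (h | ⟨hne, hlt⟩)
            · omega
            · rcases himgge with h' | h' <;> omega
          have hL1 : ((c :: rest).drop vp.length).length < fb := by
            simp only [List.length_drop, List.length_cons] at *
            omega
          have hL2 : (([] : List Char) ++ (c :: rest).drop vp.length).length < fa := by
            simp only [List.nil_append, List.length_drop, List.length_cons,
              List.length_append] at *
            omega
          have hS : ([] : List Char) ++ (c :: rest).drop vp.length <:+ content := by
            simp only [List.nil_append]
            exact (List.drop_suffix _ _).trans ((List.suffix_append buf (c :: rest)).trans hsuf)
          have hN : ∀ j, j < ([] : List Char).length →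
              ¬ vp <+: (([] : List Char) ++ (c :: rest).drop vp.length).drop j ∧
              ¬ ip <+: (([] : List Char) ++ (c :: rest).drop vp.length).drop j := by
            intro j hj; exact absurd hj (by simp)
          conv_lhs => rw [pvALoop]
          rw [if_neg hremne, h1, h2, hfindvp, if_neg hcond1, if_neg hcond2]
          conv_rhs => rw [pvBLoop]
          rw [if_pos (show vp ≠ [] ∧ vp.isPrefixOf (c :: rest) = true from ⟨hvp, hv⟩),
            hpre_eq, hrem_eq]
          exact ih _ [] ii _ _ fa hL1 hL2 hS hN
        · by_cases hi : ip.isPrefixOf (c :: rest)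
          · -- image placeholder matches here: A takes the image branch with img_pos = buf.length
            have hipre : ip <+: (c :: rest) := List.isPrefixOf_iff_prefix.mp hi
            have hfindip : PySem.Chars.find (buf ++ c :: rest) ip = (buf.length : Int) :=
              pvFind_eq_of_first _ _ _ (by rw [hdropbuf]; exact hipre) (fun i hic => (hnb i hic).2)
            have hasImg : PySem.Chars.isIn ip content = true :=
              (PySem.Chars.isIn_iff_infix ip content).mpr
                (pvInfix_of_suffix_drop content _ ip buf.length hsuf (by rw [hdropbuf]; exact hipre))
            have hvidgt : PySem.Chars.find (buf ++ c :: rest) vp = -1 ∨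
                (buf.length : Int) < PySem.Chars.find (buf ++ c :: rest) vp := by
              by_cases h0 : 0 ≤ PySem.Chars.find (buf ++ c :: rest) vp
              · right
                obtain ⟨hp, _⟩ := PySem.Chars.find_spec h0
                have hne : (PySem.Chars.find (buf ++ c :: rest) vp).toNat ≠ buf.length := by
                  intro he
                  rw [he, hdropbuf] at hp
                  exact hv (List.isPrefixOf_iff_prefix.mpr hp)
                have hge : ¬ (PySem.Chars.find (buf ++ c :: rest) vp).toNat < buf.length := by
                  intro hlt
                  exact (hnb _ hlt).1 hp
                omega
              · left
                have := PySem.Chars.neg_one_le_find (buf ++ c :: rest) vp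
                omega
            have hil : 0 < ip.length := List.length_pos_iff.mpr hip
            have hcond1 : ¬ (((buf.length : Nat) : Int) = -1 ∧
                PySem.Chars.find (buf ++ c :: rest) vp = -1) := by
              omega
            have hcond2 : PySem.Chars.find (buf ++ c :: rest) vp = -1 ∨
                (((buf.length : Nat) : Int) ≠ -1 ∧
                 ((buf.length : Nat) : Int) < PySem.Chars.find (buf ++ c :: rest) vp) := by
              rcases hvidgt with h' | h'
              · exact Or.inl h'
              · exact Or.inr ⟨by omega, h'⟩
            have hpre_eq : PySem.List.slice (buf ++ c :: rest) none (some ((buf.length : Nat) : Int)) = buf := by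
              rw [PySem.List.slice_to_natCast]; exact List.take_left
            have hrem_eq : PySem.List.slice (buf ++ c :: rest) (some (((buf.length : Nat) : Int) + (ip.length : Int))) none
                = (c :: rest).drop ip.length := by
              rw [PySem.List.slice_from _ (by positivity)]
              have : (((buf.length : Nat) : Int) + (ip.length : Int)).toNat = buf.length + ip.length := by omega
              rw [this]
              simp [List.drop_append]
            have hL1 : ((c :: rest).drop ip.length).length < fb := by
              simp only [List.length_drop, List.length_cons] at *
              omega
            have hL2 : (([] : List Char) ++ (c :: rest).drop ip.length).length < fa := by
              simp only [List.nil_append, List.length_drop, List.length_cons,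
                List.length_append] at *
              omega
            have hS : ([] : List Char) ++ (c :: rest).drop ip.length <:+ content := by
              simp only [List.nil_append]
              exact (List.drop_suffix _ _).trans ((List.suffix_append buf (c :: rest)).trans hsuf)
            have hN : ∀ j, j < ([] : List Char).length →
                ¬ vp <+: (([] : List Char) ++ (c :: rest).drop ip.length).drop j ∧
                ¬ ip <+: (([] : List Char) ++ (c :: rest).drop ip.length).drop j := by
              intro j hj; exact absurd hj (by simp)
            conv_lhs => rw [pvALoop]
            rw [if_neg hremne, h1, h2, hfindip, if_neg hcond1, if_pos hcond2]
            conv_rhs => rw [pvBLoop]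
            rw [if_neg (show ¬ (vp ≠ [] ∧ vp.isPrefixOf (c :: rest) = true) from fun h => hv h.2),
              if_pos (show ip ≠ [] ∧ ip.isPrefixOf (c :: rest) = true from ⟨hip, hi⟩),
              hpre_eq, hrem_eq]
            exact ih _ [] _ vi _ fa hL1 hL2 hS hN
          · -- no placeholder starts here: B buffers c; A's state is unchanged
            have hassoc : (buf ++ [c]) ++ rest = buf ++ c :: rest := by simp
            have hL1 : rest.length < fb := by
              simp only [List.length_cons] at hfb; omega
            have hL2 : ((buf ++ [c]) ++ rest).length < fa + 1 := by rw [hassoc]; exact hfa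
            have hS : (buf ++ [c]) ++ rest <:+ content := by rw [hassoc]; exact hsuf
            have hN : ∀ j, j < (buf ++ [c]).length →
                ¬ vp <+: ((buf ++ [c]) ++ rest).drop j ∧ ¬ ip <+: ((buf ++ [c]) ++ rest).drop j := by
              intro j hj
              rw [hassoc]
              rcases Nat.lt_or_ge j buf.length with hlt | hge
              · exact hnb j hlt
              · have hje : j = buf.length := by simp at hj; omega
                rw [hje, hdropbuf]
                exact ⟨fun hp => hv (List.isPrefixOf_iff_prefix.mpr hp),
                       fun hp => hi (List.isPrefixOf_iff_prefix.mpr hp)⟩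
            have := ih rest (buf ++ [c]) ii vi acc (fa + 1) hL1 hL2 hS hN
            rw [hassoc] at this
            rw [show pvBLoop ip vp images videos (fb + 1) (c :: rest) buf ii vi acc
                = pvBLoop ip vp images videos fb rest (buf ++ [c]) ii vi acc from by
              conv_lhs => rw [pvBLoop]
              rw [if_neg (show ¬ (vp ≠ [] ∧ vp.isPrefixOf (c :: rest) = true) from fun h => hv h.2),
                if_neg (show ¬ (ip ≠ [] ∧ ip.isPrefixOf (c :: rest) = true) from fun h => hi h.2)]]
            exact this

-- ===== VERDICT (by name: the statement is the Claim_ definition above) =====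
theorem transfer_single_message_py_spec : Claim_equal_transfer_single_message_py := by
  intro content ip vp images videos _ hpre
  obtain ⟨hip, hvp⟩ := hpre
  have hip' : ip.toList ≠ [] := by
    intro h; exact hip (by simpa using congrArg String.ofList h)
  have hvp' : vp.toList ≠ [] := by
    intro h; exact hvp (by simpa using congrArg String.ofList h)
  unfold Spec_transfer_single_message_py transfer_single_message_py transfer_single_message_py_alt
  have key := pvMain ip.toList vp.toList hip' hvp' content.toList (images.getD []) (videos.getD [])
    (content.toList.length + 1) content.toList [] 0 0 [] (content.toList.length + 1)
    (by omega) (by simp) (List.suffix_refl _) (by intro j hj; exact absurd hj (by simp))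
  simpa using key
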